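-- pv_equiv track=rewrite | github.com/Enjef/Algo | 800 - 899/844 - Backspace String Compare/844 - Backspace String Compare.py | backspaceCompare_best_memory
-- ===== SOURCE A (Python) =====
-- def backspaceCompare_best_memory(s: str, t: str) -> bool:
--     stackS = []
--     for i in range(len(s)):
--         if s[i] == '#':
--             if stackS:
--                 stackS.pop()
--         else:
--             stackS.append(s[i])
--     stackT = []
--     for i in range(len(t)):
--         if t[i] == '#':
--             if stackT:
--                 stackT.pop()
--         else:
--             stackT.append(t[i])
--     return stackS == stackT
-- ===== SOURCE B (Python) =====
-- def backspaceCompare_best_memory(s: str, t: str) -> bool: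
--     def survivors_rev(u):
--         out = []
--         skip = 0
--         for c in reversed(u):
--             if c == '#':
--                 skip += 1
--             elif skip != 0:
--                 skip -= 1
--             else:
--                 out.append(c)
--         return out
--     return survivors_rev(s) == survivors_rev(t)
-- ===== Notes on version B (the rewrite author's own statement) =====
-- stated objective: alternative
-- what changed: Replaces the forward stack build with push/pop by a single reverse scan per string that counts pending backspaces and collects surviving characters (no pop operations), comparing the survivor lists.
import Mathlib
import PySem

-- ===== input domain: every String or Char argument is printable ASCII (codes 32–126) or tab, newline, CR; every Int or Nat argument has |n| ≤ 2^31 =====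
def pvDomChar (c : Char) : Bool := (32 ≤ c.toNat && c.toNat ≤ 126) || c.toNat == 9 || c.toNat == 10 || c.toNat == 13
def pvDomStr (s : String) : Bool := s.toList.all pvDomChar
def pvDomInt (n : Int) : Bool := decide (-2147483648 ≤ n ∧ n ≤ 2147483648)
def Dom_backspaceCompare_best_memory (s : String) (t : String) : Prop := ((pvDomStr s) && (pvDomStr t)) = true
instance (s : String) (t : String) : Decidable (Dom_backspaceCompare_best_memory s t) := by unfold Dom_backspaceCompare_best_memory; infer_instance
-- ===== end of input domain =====

-- B replaces the forward stack with pops by a reverse scan with a pending-backspace counter; alternative decomposition, same cost.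

-- ===== PORT A =====
-- one step of A's forward loop: push a char, '#' pops the top of the stack (if any)
def pvStepA (st : List Char) (c : Char) : List Char :=
  if c = '#' then (if st = [] then st else st.dropLast) else st ++ [c]

def backspaceCompare_best_memory (s : String) (t : String) : Bool :=
  let stackS := s.toList.foldl pvStepA []
  let stackT := t.toList.foldl pvStepA []
  stackS == stackT

-- ===== PORT B =====
-- B's inner loop over reversed(u): state (out, skip); '#' bumps skip, a char either consumes a skip or survives
def pvStepB (st : List Char × Nat) (c : Char) : List Char × Nat :=
  if c = '#' then (st.1, st.2 + 1)
  else if st.2 ≠ 0 then (st.1, st.2 - 1)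
  else (st.1 ++ [c], st.2)

def pvSurvivorsRev (u : String) : List Char :=
  (u.toList.reverse.foldl pvStepB ([], 0)).1

def backspaceCompare_best_memory_alt (s : String) (t : String) : Bool :=
  pvSurvivorsRev s == pvSurvivorsRev t

-- ===== PRECONDITION & SPEC =====
def Spec_backspaceCompare_best_memory (s : String) (t : String) (out : Bool) : Prop := out = backspaceCompare_best_memory_alt s t
instance (s : String) (t : String) (out : Bool) : Decidable (Spec_backspaceCompare_best_memory s t out) := by unfold Spec_backspaceCompare_best_memory; infer_instance

-- ===== CLAIM (what is proved, stated in full; the proofs are below) =====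
def Claim_equal_backspaceCompare_best_memory : Prop := ∀ (s : String) (t : String), Dom_backspaceCompare_best_memory s t → Spec_backspaceCompare_best_memory s t (backspaceCompare_best_memory s t)

-- ===== LEMMAS AND PROOFS =====

-- recursion-form of B's scan (survivors of the reversed list, given k pending skips)
def pvBScan : List Char → Nat → List Char
  | [], _ => []
  | c :: r, k =>
    if c = '#' then pvBScan r (k + 1)
    else if k ≠ 0 then pvBScan r (k - 1)
    else c :: pvBScan r k

theorem pvFoldB_eq_bscan (l : List Char) (out : List Char) (k : Nat) :
    (l.foldl pvStepB (out, k)).1 = out ++ pvBScan l k := by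
  induction l generalizing out k with
  | nil => simp [pvBScan]
  | cons c r ih =>
    simp only [List.foldl_cons, pvStepB, pvBScan]
    split_ifs with h1 h2
    · simp [ih]
    · simp [ih]
    · simp [ih]

theorem pvBScan_reverse (l : List Char) (k : Nat) :
    pvBScan l.reverse k =
      ((l.foldl pvStepA []).take ((l.foldl pvStepA []).length - k)).reverse := by
  induction l using List.reverseRecOn generalizing k with
  | nil => simp [pvBScan]
  | append_singleton l' c ih =>
    rw [List.reverse_append, List.reverse_singleton, List.singleton_append,
        List.foldl_append]
    simp only [List.foldl_cons, List.foldl_nil, pvStepA, pvBScan]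
    split_ifs with h1 h2 h3
    · -- c = '#', stack empty
      rw [ih (k + 1), h2]
      simp
    · -- c = '#', stack nonempty: pop = take (len - 1)
      rw [ih (k + 1), List.dropLast_eq_take, List.take_take, List.length_take]
      congr 2
      omega
    · -- ordinary character, pending skip consumes it
      rw [ih (k - 1)]
      have hle : (List.foldl pvStepA [] l' ++ [c]).length - k ≤ (List.foldl pvStepA [] l').length := by
        simp; omega
      rw [List.take_append_of_le_length hle]
      congr 2
      simp
      omega
    · -- ordinary character, no pending skip: it survives
      have hk0 : k = 0 := by omega
      subst hk0
      rw [ih 0]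
      simp only [Nat.sub_zero, List.take_length, List.reverse_append]
      simp

theorem pvSurvivorsRev_eq (u : String) :
    pvSurvivorsRev u = (u.toList.foldl pvStepA []).reverse := by
  unfold pvSurvivorsRev
  rw [pvFoldB_eq_bscan, pvBScan_reverse]
  simp

-- ===== VERDICT (by name: the statement is the Claim_ definition above) =====
theorem backspaceCompare_best_memory_spec : Claim_equal_backspaceCompare_best_memory := by
  intro s t _
  unfold Spec_backspaceCompare_best_memory backspaceCompare_best_memory backspaceCompare_best_memory_alt
  rw [pvSurvivorsRev_eq, pvSurvivorsRev_eq]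
  rcases eq_or_ne (List.foldl pvStepA [] s.toList) (List.foldl pvStepA [] t.toList) with h | h
  · simp [h]
  · simp [h, List.reverse_inj]
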